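-- pv_equiv track=rewrite | github.com/pypi-data/pypi-mirror-251 | packages/sedaro/sedaro-4.9.19-py3-none-any.whl/sedaro/results/utils.py | _block_type_in_supers
-- ===== SOURCE A (Python) =====
-- def _block_type_in_supers(block_type: str, meta_supers: dict, super_type: str = 'Agent') -> bool:
--     if block_type == super_type:
--         return True
--     elif block_type in meta_supers:
--         supertypes = meta_supers[block_type]
--         if len(supertypes) == 0:
--             return False
--         return any(_block_type_in_supers(supertype, meta_supers, super_type=super_type) for supertype in supertypes)
--     else:
--         return False
-- ===== SOURCE B (Python) =====
-- def _block_type_in_supers(block_type: str, meta_supers: dict, super_type: str = 'Agent') -> bool: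
--     # Iterative set-closure: saturate the set of types reachable from block_type
--     # (len(meta_supers) sweeps suffice: a shortest supertype chain never repeats a key),
--     # then test membership.  No recursion.
--     reach = {block_type}
--     for _ in range(len(meta_supers)):
--         for k, vs in meta_supers.items():
--             if k in reach:
--                 reach.update(vs)
--     return super_type in reach
-- ===== Notes on version B (the rewrite author's own statement) =====
-- stated objective: alternative
-- what changed: Replaces A's naive unmemoized recursion (exponential worst case, RecursionError on reachable cycles) by an iterative set-closure: saturate the set of types reachable from block_type with len(meta_supers) whole-dict sweeps, then test super_type membership.
-- outside the precondition, e.g. on _block_type_in_supers('b', {'b': ['Agent', 'c'], 'c': ['c']}, 'Agent'): A returns True, B returns True; on _block_type_in_supers('b', {'b': ['c', 'Agent'], 'c': ['c']}, 'Agent'): A raises RecursionError, B returns True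
import Mathlib
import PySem

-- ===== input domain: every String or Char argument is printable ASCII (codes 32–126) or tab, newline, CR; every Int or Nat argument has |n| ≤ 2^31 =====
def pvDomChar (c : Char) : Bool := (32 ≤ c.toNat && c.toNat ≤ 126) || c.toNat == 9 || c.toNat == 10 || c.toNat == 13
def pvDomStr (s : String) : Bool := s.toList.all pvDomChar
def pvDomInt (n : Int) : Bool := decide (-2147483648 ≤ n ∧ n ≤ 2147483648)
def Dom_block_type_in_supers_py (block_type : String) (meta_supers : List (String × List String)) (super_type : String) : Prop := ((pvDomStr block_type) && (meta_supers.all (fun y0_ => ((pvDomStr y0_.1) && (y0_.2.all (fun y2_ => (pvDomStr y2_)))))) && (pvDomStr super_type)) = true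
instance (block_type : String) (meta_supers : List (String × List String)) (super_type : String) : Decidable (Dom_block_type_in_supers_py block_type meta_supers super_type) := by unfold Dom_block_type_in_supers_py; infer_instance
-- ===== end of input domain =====

-- B replaces A's naive unmemoized recursion by an iterative reachable-set closure
-- (len(meta_supers) sweeps, then a membership test): an alternative algorithm that
-- always terminates; equivalence is proved on Pre_ (dict-shaped lists whose supertype
-- graph has no cycle reachable from block_type while avoiding super_type).


-- ===== PORT A =====
-- A's recursion is unbounded in Python; the port carries fuel meta_supers.length + 1,
-- which on Pre_ inputs is never exhausted on a decisive branch: a shortest witnessing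
-- chain never repeats a key, so its length is ≤ meta_supers.length.
def pvGoA (m : List (String × List String)) (s : String) : Nat → String → Bool
  | 0, _ => false
  | n + 1, b =>
    if b == s then true
    else
      match m.find? (fun kv => kv.1 == b) with      -- 'block_type in meta_supers' + 'meta_supers[block_type]'
      | some kv => if kv.2.length = 0 then false else kv.2.any (fun y => pvGoA m s n y)
      | none => false

def block_type_in_supers_py (block_type : String) (meta_supers : List (String × List String)) (super_type : String) : Bool :=
  pvGoA meta_supers super_type (meta_supers.length + 1) block_type

-- ===== PORT B =====
-- one sweep: 'for k, vs in meta_supers.items(): if k in reach: reach.update(vs)'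
def pvSweep (m : List (String × List String)) (R : PySem.Set String) : PySem.Set String :=
  m.foldl (fun R kv => if PySem.Set.contains R kv.1 then PySem.Set.update R kv.2 else R) R

-- 'for _ in range(n): <sweep>'
def pvIter (m : List (String × List String)) : Nat → PySem.Set String → PySem.Set String
  | 0, R => R
  | n + 1, R => pvIter m n (pvSweep m R)

def block_type_in_supers_py_alt (block_type : String) (meta_supers : List (String × List String)) (super_type : String) : Bool :=
  PySem.Set.contains (pvIter meta_supers meta_supers.length (PySem.Set.ofList [block_type])) super_type

-- ===== PRECONDITION & SPEC =====
-- helper of Pre_ only (independent of both ports): one-step descendant growth that never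
-- expands the key super_type (A stops recursing at super_type); its meta_supers.length-fold
-- iterate contains every super_type-avoiding descendant of the seeds, since a shortest
-- such chain never repeats a key.
def pvGrowAvoid (m : List (String × List String)) (s : String) (R : PySem.Set String) : PySem.Set String :=
  PySem.Set.update R ((m.filter (fun kv => decide (kv.1 ∈ R ∧ kv.1 ≠ s))).flatMap Prod.snd)
-- Pre_ excludes association lists with duplicate keys (not the image of a Python dict),
-- and inputs whose supertype graph has a cycle reachable from block_type through keys
-- other than super_type: on exactly those inputs A's unmemoized recursion can hit
-- RecursionError (it raises whenever no path to super_type exists, and raises or returns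
-- True depending on child order otherwise; B returns the reachability answer there).
def Pre_block_type_in_supers_py (block_type : String) (meta_supers : List (String × List String)) (super_type : String) : Prop :=
  (meta_supers.map Prod.fst).Nodup ∧
  ∀ kv ∈ meta_supers,
    kv.1 ∈ (pvGrowAvoid meta_supers super_type)^[meta_supers.length] (PySem.Set.ofList [block_type]) →
    kv.1 ≠ super_type →
    kv.1 ∉ (pvGrowAvoid meta_supers super_type)^[meta_supers.length] (PySem.Set.ofList kv.2)
instance (block_type : String) (meta_supers : List (String × List String)) (super_type : String) : Decidable (Pre_block_type_in_supers_py block_type meta_supers super_type) := by unfold Pre_block_type_in_supers_py; infer_instance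

def pvWitness_block_type_in_supers_py : String × (List (String × List String)) × String :=
  ("b", [("b", ["a"])], "a")

def Spec_block_type_in_supers_py (block_type : String) (meta_supers : List (String × List String)) (super_type : String) (out : Bool) : Prop := out = block_type_in_supers_py_alt block_type meta_supers super_type
instance (block_type : String) (meta_supers : List (String × List String)) (super_type : String) (out : Bool) : Decidable (Spec_block_type_in_supers_py block_type meta_supers super_type out) := by unfold Spec_block_type_in_supers_py; infer_instance

-- ===== CLAIM (what is proved, stated in full; the proofs are below) =====
def Claim_equal_block_type_in_supers_py : Prop := ∀ (block_type : String) (meta_supers : List (String × List String)) (super_type : String), Dom_block_type_in_supers_py block_type meta_supers super_type → Pre_block_type_in_supers_py block_type meta_supers super_type → Spec_block_type_in_supers_py block_type meta_supers super_type (block_type_in_supers_py block_type meta_supers super_type)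

-- ===== LEMMAS AND PROOFS =====

-- first-match successor list (the graph both programs walk)
def pvSuccs (m : List (String × List String)) (x : String) : List String :=
  ((m.find? (fun kv => kv.1 == x)).map Prod.snd).getD []

-- a supertype chain from b to s
def pvPath (m : List (String × List String)) (s : String) : String → List String → Prop
  | b, [] => b = s
  | b, y :: ys => y ∈ pvSuccs m b ∧ pvPath m s y ys

theorem pvWitness_ok :
    Dom_block_type_in_supers_py pvWitness_block_type_in_supers_py.1 pvWitness_block_type_in_supers_py.2.1 pvWitness_block_type_in_supers_py.2.2 ∧
    Pre_block_type_in_supers_py pvWitness_block_type_in_supers_py.1 pvWitness_block_type_in_supers_py.2.1 pvWitness_block_type_in_supers_py.2.2 := by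
  decide


theorem pvSuccs_eq_of_find? {m : List (String × List String)} {b : String} {kv : String × List String}
    (h : m.find? (fun kv => kv.1 == b) = some kv) : pvSuccs m b = kv.2 := by
  simp [pvSuccs, h]

theorem pvSuccs_eq_nil_of_find? {m : List (String × List String)} {b : String}
    (h : m.find? (fun kv => kv.1 == b) = none) : pvSuccs m b = [] := by
  simp [pvSuccs, h]

theorem pvSuccs_key {m : List (String × List String)} {b y : String} (hy : y ∈ pvSuccs m b) :
    ∃ kv ∈ m, kv.1 = b ∧ kv.2 = pvSuccs m b := by
  cases hf : m.find? (fun kv => kv.1 == b) with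
  | none => rw [pvSuccs_eq_nil_of_find? hf] at hy; simp at hy
  | some kv =>
    refine ⟨kv, List.mem_of_find?_eq_some hf, ?_, (pvSuccs_eq_of_find? hf).symm⟩
    have := List.find?_some hf
    simpa using this

-- A's fueled recursion returns true exactly when a chain shorter than the fuel exists
theorem pvGoA_iff (m : List (String × List String)) (s : String) :
    ∀ (n : Nat) (b : String), pvGoA m s n b = true ↔ ∃ xs, xs.length < n ∧ pvPath m s b xs := by
  intro n
  induction n with
  | zero => intro b; simp [pvGoA]
  | succ n ih =>
    intro b
    by_cases hb : b = s
    · subst hb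
      simp only [pvGoA, BEq.rfl, if_true, true_iff]
      exact ⟨[], Nat.succ_pos n, rfl⟩
    · have hbs : ¬ ((b == s) = true) := by simpa using hb
      constructor
      · intro h
        rw [pvGoA, if_neg hbs] at h
        cases hf : m.find? (fun kv => kv.1 == b) with
        | none => rw [hf] at h; simp at h
        | some kv =>
          rw [hf] at h
          have h' : (if kv.2.length = 0 then false else kv.2.any fun y => pvGoA m s n y) = true := h
          split_ifs at h' with hlen
          obtain ⟨y, hy, hgo⟩ := List.any_eq_true.mp h'
          obtain ⟨xs, hlt, hp⟩ := (ih y).mp hgo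
          refine ⟨y :: xs, by simpa using Nat.succ_lt_succ hlt, ?_, hp⟩
          rw [pvSuccs_eq_of_find? hf]; exact hy
      · rintro ⟨xs, hlt, hp⟩
        cases xs with
        | nil => exact absurd hp hb
        | cons y ys =>
          obtain ⟨hy, hp'⟩ := hp
          rw [pvGoA, if_neg hbs]
          cases hf : m.find? (fun kv => kv.1 == b) with
          | none => rw [pvSuccs_eq_nil_of_find? hf] at hy; simp at hy
          | some kv =>
            rw [pvSuccs_eq_of_find? hf] at hy
            show (if kv.2.length = 0 then false else kv.2.any fun y => pvGoA m s n y) = true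
            rw [if_neg (by intro h0; rw [List.length_eq_zero_iff] at h0; rw [h0] at hy; simp at hy)]
            refine List.any_eq_true.mpr ⟨y, hy, (ih y).mpr ⟨ys, ?_, hp'⟩⟩
            simpa using hlt

-- any visited node of a chain starts a suffix chain
theorem pvPath_suffix {m : List (String × List String)} {s : String} :
    ∀ (xs : List String) (b : String), pvPath m s b xs →
    ∀ w ∈ b :: xs, ∃ zs, (w :: zs) <:+ (b :: xs) ∧ pvPath m s w zs := by
  intro xs
  induction xs with
  | nil =>
    intro b hp w hw
    simp only [List.mem_singleton] at hw
    subst hw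
    exact ⟨[], List.suffix_refl _, hp⟩
  | cons y ys ih =>
    intro b hp w hw
    rcases List.mem_cons.mp hw with h | h
    · subst h; exact ⟨y :: ys, List.suffix_refl _, hp⟩
    · obtain ⟨zs, hs, hzp⟩ := ih y hp.2 w h
      exact ⟨zs, hs.trans (List.suffix_cons b (y :: ys)), hzp⟩

-- every chain contains a duplicate-free chain (cut at the first repeated node)
theorem pvPath_prune {m : List (String × List String)} {s : String} :
    ∀ (xs : List String) (b : String), pvPath m s b xs →
    ∃ ys, ys.length ≤ xs.length ∧ pvPath m s b ys ∧ (b :: ys).Nodup := by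
  intro xs
  induction xs with
  | nil => intro b hp; exact ⟨[], Nat.le_refl _, hp, List.nodup_singleton b⟩
  | cons y rest ih =>
    intro b hp
    obtain ⟨ys', hlen, hp', hnd⟩ := ih y hp.2
    by_cases hb : b ∈ y :: ys'
    · obtain ⟨zs, hs, hzp⟩ := pvPath_suffix ys' y hp' b hb
      have hlen2 : (b :: zs).length ≤ (y :: ys').length := hs.sublist.length_le
      exact ⟨zs, by simp at hlen2 ⊢; omega, hzp, hnd.sublist hs.sublist⟩
    · exact ⟨y :: ys', by simpa using Nat.succ_le_succ hlen, ⟨hp.1, hp'⟩,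
        List.nodup_cons.mpr ⟨hb, hnd⟩⟩

-- every node of a chain except the last is a key of the dict
theorem pvPath_keys {m : List (String × List String)} {s : String} :
    ∀ (xs : List String) (b : String), pvPath m s b xs →
    ∀ w ∈ (b :: xs).dropLast, w ∈ m.map Prod.fst := by
  intro xs
  induction xs with
  | nil => intro b _ w hw; simp at hw
  | cons y ys ih =>
    intro b hp w hw
    rw [List.dropLast_cons₂] at hw
    rcases List.mem_cons.mp hw with h | h
    · subst h
      obtain ⟨kv, hkv, hk, _⟩ := pvSuccs_key hp.1
      exact List.mem_map.mpr ⟨kv, hkv, hk⟩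
    · exact ih y hp.2 w h

-- a duplicate-free chain is no longer than the dict
theorem pvPath_len_le {m : List (String × List String)} {s b : String} {xs : List String}
    (hp : pvPath m s b xs) (hnd : (b :: xs).Nodup) : xs.length ≤ m.length := by
  have hsub : (b :: xs).dropLast ⊆ m.map Prod.fst := fun w hw => pvPath_keys xs b hp w hw
  have hnd' : (b :: xs).dropLast.Nodup := hnd.sublist (List.dropLast_sublist _)
  have hle := (hnd'.subperm hsub).length_le
  simpa using hle

theorem pvA_iff (m : List (String × List String)) (s b : String) :
    block_type_in_supers_py b m s = true ↔ ∃ xs, pvPath m s b xs := by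
  unfold block_type_in_supers_py
  rw [pvGoA_iff]
  constructor
  · rintro ⟨xs, _, hp⟩; exact ⟨xs, hp⟩
  · rintro ⟨xs, hp⟩
    obtain ⟨ys, _, hp', hnd⟩ := pvPath_prune xs b hp
    exact ⟨ys, Nat.lt_succ_of_le (pvPath_len_le hp' hnd), hp'⟩

theorem pvSweep_cons (kv : String × List String) (tl : List (String × List String))
    (R : PySem.Set String) :
    pvSweep (kv :: tl) R =
      pvSweep tl (if PySem.Set.contains R kv.1 then PySem.Set.update R kv.2 else R) := rfl

theorem pvSweep_ext : ∀ (m : List (String × List String)) (R : PySem.Set String),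
    ∀ x ∈ R, x ∈ pvSweep m R := by
  intro m
  induction m with
  | nil => intro R x hx; exact hx
  | cons kv tl ih =>
    intro R x hx
    rw [pvSweep_cons]
    apply ih
    split
    · exact (PySem.Set.mem_update _ _ _).mpr (Or.inl hx)
    · exact hx

theorem pvSweep_step : ∀ (m : List (String × List String)) (R : PySem.Set String)
    (k : String) (vs : List String), (k, vs) ∈ m → k ∈ R → ∀ y ∈ vs, y ∈ pvSweep m R := by
  intro m
  induction m with
  | nil => intro R k vs h; simp at h
  | cons kv tl ih =>
    intro R k vs hmem hk y hy
    rw [pvSweep_cons]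
    rcases List.mem_cons.mp hmem with h | h
    · have hc : PySem.Set.contains R kv.1 = true := by
        rw [← h]; exact (PySem.Set.contains_iff _ _).mpr hk
      rw [if_pos hc]
      apply pvSweep_ext
      rw [← h]
      exact (PySem.Set.mem_update _ _ _).mpr (Or.inr hy)
    · refine ih _ k vs h ?_ y hy
      split
      · exact (PySem.Set.mem_update _ _ _).mpr (Or.inl hk)
      · exact hk

-- with unique keys the first match for a present key is that entry
theorem pvFind_of_nodup : ∀ {m : List (String × List String)},
    (m.map Prod.fst).Nodup → ∀ {k : String} {vs : List String},
    (k, vs) ∈ m → m.find? (fun kv => kv.1 == k) = some (k, vs) := by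
  intro m
  induction m with
  | nil => intro _ k vs h; simp at h
  | cons hd tl ih =>
    intro hnd k vs hmem
    rw [List.map_cons, List.nodup_cons] at hnd
    rcases List.mem_cons.mp hmem with h | h
    · rw [List.find?_cons_of_pos (p := fun kv => kv.1 == k) (a := hd) (by rw [← h]; simp)]
      rw [← h]
    · have hk : k ∈ tl.map Prod.fst := List.mem_map.mpr ⟨(k, vs), h, rfl⟩
      have hne : ¬ ((hd.1 == k) = true) := by
        simp only [beq_iff_eq]
        intro he; exact hnd.1 (he ▸ hk)
      rw [List.find?_cons_of_neg (p := fun kv => kv.1 == k) (a := hd) hne]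
      exact ih hnd.2 h

-- a sweep only adds successors of members (unique keys)
theorem pvSweep_sound {m : List (String × List String)} (hnd : (m.map Prod.fst).Nodup)
    (P : String → Prop) (hcl : ∀ x y, P x → y ∈ pvSuccs m x → P y) :
    ∀ (l : List (String × List String)), (∀ kv ∈ l, kv ∈ m) →
    ∀ (R : PySem.Set String), (∀ x ∈ R, P x) →
    ∀ z ∈ l.foldl (fun R kv => if PySem.Set.contains R kv.1 then PySem.Set.update R kv.2 else R) R,
      P z := by
  intro l
  induction l with
  | nil => intro _ R hR z hz; exact hR z hz
  | cons kv tl ih =>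
    intro hsub R hR
    rw [List.foldl_cons]
    apply ih (fun x hx => hsub x (List.mem_cons_of_mem _ hx))
    intro x hx
    by_cases hc : PySem.Set.contains R kv.1 = true
    · rw [if_pos hc] at hx
      rcases (PySem.Set.mem_update _ _ _).mp hx with h | h
      · exact hR x h
      · have hk : P kv.1 := hR kv.1 ((PySem.Set.contains_iff _ _).mp hc)
        have hkvm : (kv.1, kv.2) ∈ m := by
          have := hsub kv (List.mem_cons_self ..)
          simpa using this
        have hsucc : pvSuccs m kv.1 = kv.2 := pvSuccs_eq_of_find? (pvFind_of_nodup hnd hkvm)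
        exact hcl kv.1 x hk (hsucc ▸ h)
    · rw [if_neg hc] at hx; exact hR x hx

theorem pvIter_ext (m : List (String × List String)) :
    ∀ (n : Nat) (R : PySem.Set String), ∀ x ∈ R, x ∈ pvIter m n R := by
  intro n
  induction n with
  | zero => intro R x hx; exact hx
  | succ n ih =>
    intro R x hx
    rw [pvIter]
    exact ih _ x (pvSweep_ext m R x hx)

theorem pvIter_sound {m : List (String × List String)} (hnd : (m.map Prod.fst).Nodup)
    (P : String → Prop) (hcl : ∀ x y, P x → y ∈ pvSuccs m x → P y) :
    ∀ (n : Nat) (R : PySem.Set String), (∀ x ∈ R, P x) → ∀ z ∈ pvIter m n R, P z := by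
  intro n
  induction n with
  | zero => intro R hR z hz; exact hR z hz
  | succ n ih =>
    intro R hR z hz
    rw [pvIter] at hz
    exact ih _ (pvSweep_sound hnd P hcl m (fun _ h => h) R hR) z hz

-- extend a chain by one edge at its end
theorem pvPath_snoc {m : List (String × List String)} :
    ∀ (xs : List String) (b t y : String),
    pvPath m t b xs → y ∈ pvSuccs m t → pvPath m y b (xs ++ [y]) := by
  intro xs
  induction xs with
  | nil =>
    intro b t y hp hy
    have hb : b = t := hp
    exact ⟨hb ▸ hy, rfl⟩
  | cons z zs ih =>
    intro b t y hp hy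
    exact ⟨hp.1, ih z t y hp.2 hy⟩

theorem pvIter_complete {m : List (String × List String)} {s : String} :
    ∀ (xs : List String) (n : Nat) (b : String) (R : PySem.Set String),
    b ∈ R → pvPath m s b xs → xs.length ≤ n → s ∈ pvIter m n R := by
  intro xs
  induction xs with
  | nil =>
    intro n b R hb hp _
    have hbs : b = s := hp
    exact hbs ▸ pvIter_ext m n R b hb
  | cons y ys ih =>
    intro n b R hb hp hlen
    cases n with
    | zero => simp at hlen
    | succ n =>
      rw [pvIter]
      refine ih n y (pvSweep m R) ?_ hp.2 (by simpa using hlen)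
      obtain ⟨kv, hkv, hk, hvs⟩ := pvSuccs_key hp.1
      refine pvSweep_step m R b (pvSuccs m b) ?_ hb y hp.1
      have : kv = (b, pvSuccs m b) := by
        cases kv; simp at hk hvs; rw [hk, hvs]
      exact this ▸ hkv

theorem pvB_iff {m : List (String × List String)} {s b : String}
    (hnd : (m.map Prod.fst).Nodup) :
    block_type_in_supers_py_alt b m s = true ↔ ∃ xs, pvPath m s b xs := by
  unfold block_type_in_supers_py_alt
  rw [PySem.Set.contains_iff]
  constructor
  · intro h
    refine pvIter_sound hnd (fun z => ∃ xs, pvPath m z b xs)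
      (fun x y ⟨xs, hp⟩ hy => ⟨xs ++ [y], pvPath_snoc xs b x y hp hy⟩)
      m.length (PySem.Set.ofList [b]) ?_ s h
    intro x hx
    have : x = b := by simpa using (PySem.Set.mem_ofList _ _).mp hx
    exact ⟨[], by rw [this]; exact (rfl : b = b)⟩
  · rintro ⟨xs, hp⟩
    obtain ⟨ys, _, hp', hnd'⟩ := pvPath_prune xs b hp
    exact pvIter_complete ys m.length b _ ((PySem.Set.mem_ofList _ _).mpr (by simp)) hp'
      (pvPath_len_le hp' hnd')


-- ===== VERDICT (by name: the statement is the Claim_ definition above) =====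
theorem block_type_in_supers_py_spec : Claim_equal_block_type_in_supers_py := by
  intro b m s _ hpre
  unfold Spec_block_type_in_supers_py
  have hA := pvA_iff m s b
  have hB := pvB_iff (m := m) (s := s) (b := b) hpre.1
  exact Bool.eq_iff_iff.mpr (hA.trans hB.symm)
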